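-- pv_equiv track=rewrite | github.com/CREATIVE5-io/Hestia-IoT-web | app/models/hestia_operations.py | _at_command_to_ascii
-- ===== SOURCE A (Python) =====
-- def _at_command_to_ascii(command):
--     """
--     Convert AT command string to list of ASCII codes
--     Args:
--         command (str): AT command string
--     Returns:
--         list: List of ASCII codes with padding
--     """
--     ascii_codes = []
--     result = []
--     for char in command:
--         ascii_codes.append(ord(char))
--     if len(ascii_codes)%2 != 0:
--         ascii_codes.append(0)
--
--     # Process pairs of bytes
--     for i in range(0, len(ascii_codes)-1, 2):
--         # Shift first byte left 8 bits and add second byte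
--         combined = (ascii_codes[i] << 8) + ascii_codes[i + 1]
--         result.append(combined)
--     return result
-- ===== SOURCE B (Python) =====
-- def _at_command_to_ascii(command):
--     """Streaming state machine: a single pass over the characters carrying a
--     pending high byte; emits one packed word each time the low byte arrives,
--     and flushes a final hi<<8 word (implicit low byte 0) for odd length.
--     No index arithmetic, no intermediate ASCII list, no padding step."""
--     result = []
--     pending = None
--     for ch in command:
--         if pending is None:
--             pending = ord(ch) << 8
--         else:
--             result.append(pending + ord(ch))
--             pending = None
--     if pending is not None:
--         result.append(pending)
--     return result
-- ===== Notes on version B (the rewrite author's own statement) =====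
-- stated objective: alternative
-- what changed: Replaced the build-ASCII-list / pad / stride-2 index loop with an online state machine: one pass over the characters carrying an optional pending high byte, emitting a word per completed pair and flushing the pending word at the end.
import Mathlib
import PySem

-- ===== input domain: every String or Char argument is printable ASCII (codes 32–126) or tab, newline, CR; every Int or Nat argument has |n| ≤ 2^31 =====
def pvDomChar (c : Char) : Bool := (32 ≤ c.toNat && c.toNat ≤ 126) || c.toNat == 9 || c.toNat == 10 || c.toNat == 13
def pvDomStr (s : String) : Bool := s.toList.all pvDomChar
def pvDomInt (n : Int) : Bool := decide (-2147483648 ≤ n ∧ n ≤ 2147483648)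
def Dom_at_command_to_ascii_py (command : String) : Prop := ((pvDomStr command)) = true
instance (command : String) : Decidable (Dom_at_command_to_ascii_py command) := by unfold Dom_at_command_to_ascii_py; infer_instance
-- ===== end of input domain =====

-- B replaces A's build-ASCII-list / pad / stride-2 index loop with an online
-- state machine: one pass carrying an optional pending high byte; objective: alternative.


-- ===== PORT A =====
-- literal port of _at_command_to_ascii: build the ASCII-code list, pad to even
-- length, then loop over range(0, len-1, 2) combining pairs.  The loop indices
-- are always in range, so ascii_codes[i] is ported as pyGetD with default 0.
def at_command_to_ascii_py (command : String) : List Int :=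
  let ascii0 : List Int := command.toList.foldl (fun acc c => acc ++ [(c.toNat : Int)]) []
  let ascii : List Int := if ascii0.length % 2 ≠ 0 then ascii0 ++ [0] else ascii0
  (PySem.List.pyRange 0 ((ascii.length : Int) - 1) 2).foldl
    (fun r i => r ++ [(PySem.List.pyGetD ascii i 0 <<< (8 : Nat)) + PySem.List.pyGetD ascii (i + 1) 0]) []

-- ===== PORT B =====
-- port of Source B: a single fold over the characters whose state is
-- (result, pending : Option Int); the final match flushes a pending word,
-- mirroring the trailing 'if pending is not None'.
def at_command_to_ascii_py_alt (command : String) : List Int :=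
  match command.toList.foldl
    (fun (st : List Int × Option Int) ch =>
      match st.2 with
      | none => (st.1, some ((ch.toNat : Int) <<< (8 : Nat)))
      | some p => (st.1 ++ [p + (ch.toNat : Int)], none))
    ([], none) with
  | (r, none) => r
  | (r, some p) => r ++ [p]

-- ===== PRECONDITION & SPEC =====
def Spec_at_command_to_ascii_py (command : String) (out : List Int) : Prop := out = at_command_to_ascii_py_alt command
instance (command : String) (out : List Int) : Decidable (Spec_at_command_to_ascii_py command out) := by unfold Spec_at_command_to_ascii_py; infer_instance

-- ===== CLAIM (what is proved, stated in full; the proofs are below) =====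
def Claim_equal_at_command_to_ascii_py : Prop := ∀ (command : String), Dom_at_command_to_ascii_py command → Spec_at_command_to_ascii_py command (at_command_to_ascii_py command)

-- ===== LEMMAS AND PROOFS =====

-- common reference value: the char list packed two at a time
def pvPack : List Char → List Int
  | [] => []
  | [a] => [(a.toNat : Int) <<< (8 : Nat)]
  | a :: b :: t => (((a.toNat : Int) <<< (8 : Nat)) + (b.toNat : Int)) :: pvPack t

-- B's fold equals pvPack, with the accumulated result generalized
lemma alt_loop_eq_pack (cs : List Char) (res : List Int) :
    (match cs.foldl
      (fun (st : List Int × Option Int) ch =>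
        match st.2 with
        | none => (st.1, some ((ch.toNat : Int) <<< (8 : Nat)))
        | some p => (st.1 ++ [p + (ch.toNat : Int)], none))
      (res, none) with
     | (r, none) => r
     | (r, some p) => r ++ [p]) = res ++ pvPack cs := by
  induction cs using pvPack.induct generalizing res with
  | case1 => simp [pvPack]
  | case2 a => simp [pvPack]
  | case3 a b t ih =>
    simp only [List.foldl_cons]
    rw [ih (res ++ [(a.toNat : Int) <<< (8 : Nat) + (b.toNat : Int)])]
    simp [pvPack]

-- the padded ASCII list of a::b::t is ord a :: ord b :: padded list of t
lemma padded_cons_cons (a b : Char) (t : List Char) :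
    (if (((a :: b :: t).map (fun c => (c.toNat : Int))).length % 2 ≠ 0) then
       ((a :: b :: t).map (fun c => (c.toNat : Int))) ++ [0]
     else ((a :: b :: t).map (fun c => (c.toNat : Int)))) =
    (a.toNat : Int) :: (b.toNat : Int) ::
      (if ((t.map (fun c => (c.toNat : Int)))).length % 2 ≠ 0 then
         (t.map (fun c => (c.toNat : Int))) ++ [0]
       else (t.map (fun c => (c.toNat : Int)))) := by
  simp only [List.map_cons, List.length_cons]
  by_cases h : (t.map (fun c => (c.toNat : Int))).length % 2 ≠ 0
  · rw [if_pos (by omega), if_pos h]; simp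
  · rw [if_neg (by omega), if_neg h]

-- A's indexed map over the padded list equals pvPack
lemma range_map_eq_pack (cs : List Char) :
    (List.range ((cs.length + 1) / 2)).map
      (fun k =>
        ((if ((cs.map (fun c => (c.toNat : Int)))).length % 2 ≠ 0 then
            (cs.map (fun c => (c.toNat : Int))) ++ [0]
          else (cs.map (fun c => (c.toNat : Int)))).getD (2 * k) 0 <<< (8 : Nat)) +
        (if ((cs.map (fun c => (c.toNat : Int)))).length % 2 ≠ 0 then
            (cs.map (fun c => (c.toNat : Int))) ++ [0]
          else (cs.map (fun c => (c.toNat : Int)))).getD (2 * k + 1) 0) = pvPack cs := by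
  induction cs using pvPack.induct with
  | case1 => simp [pvPack]
  | case2 a => simp [pvPack]
  | case3 a b t ih =>
    have hn : ((a :: b :: t).length + 1) / 2 = (t.length + 1) / 2 + 1 := by
      simp only [List.length_cons]; omega
    rw [hn, List.range_succ_eq_map, List.map_cons, List.map_map]
    simp only [padded_cons_cons]
    rw [show pvPack (a :: b :: t)
        = (((a.toNat : Int) <<< (8 : Nat)) + (b.toNat : Int)) :: pvPack t from rfl]
    congr 1

-- ===== VERDICT (by name: the statement is the Claim_ definition above) =====
theorem at_command_to_ascii_py_spec : Claim_equal_at_command_to_ascii_py := by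
  intro command _
  unfold Spec_at_command_to_ascii_py at_command_to_ascii_py at_command_to_ascii_py_alt
  simp only [PySem.List.foldl_append_singleton_eq_map, List.nil_append]
  rw [alt_loop_eq_pack command.toList []]
  set cs := command.toList with hcs
  set xs : List Int := (if (cs.map (fun c => (c.toNat : Int))).length % 2 ≠ 0 then
      cs.map (fun c => (c.toNat : Int)) ++ [0] else cs.map (fun c => (c.toNat : Int))) with hxs
  set n : Nat := (cs.length + 1) / 2 with hn'
  have hn : xs.length = 2 * n := by
    rw [hxs]; split
    case isTrue h =>
      simp only [List.length_append, List.length_map, List.length_cons, List.length_nil]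
      simp only [List.length_map] at h; omega
    case isFalse h =>
      simp only [List.length_map] at h ⊢; omega
  rw [PySem.List.pyRange_of_pos 0 ((xs.length : Int) - 1) (by norm_num), List.map_map]
  have hNA : (if (0 : Int) < (xs.length : Int) - 1 then
      (((xs.length : Int) - 1 - 0 + 2 - 1) / 2).toNat else 0) = n := by
    rw [hn]; split
    case isTrue h => push_cast at h ⊢; omega
    case isFalse h => push_cast at h ⊢; omega
  rw [hNA, List.nil_append, ← range_map_eq_pack cs]
  apply List.map_congr_left
  intro k _
  simp only [Function.comp, zero_add]
  rw [show (2 : Int) * (k : Nat) = ((2 * k : Nat) : Int) by push_cast; ring]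
  rw [show ((2 * k : Nat) : Int) + 1 = ((2 * k + 1 : Nat) : Int) by push_cast; ring]
  rw [PySem.List.pyGetD_natCast, PySem.List.pyGetD_natCast]
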